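-- pv_equiv track=rewrite | github.com/mkentrru/simple-html-builder | builder.py | build_marked
-- ===== SOURCE A (Python) =====
-- def build_marked (data):
-- 	t = data.strip ()
-- 	res = ''
-- 	while '{' in t:
-- 		t = t.partition ('{')
-- 		res += t [0]
-- 		t = t [2].partition ('}')
-- 		res += '\n<span class=\"marked\">'
-- 		res += t [0]
-- 		res += '</span>\n'
-- 		t = t[2]
-- 	res += t
--
-- 	return res
-- ===== SOURCE B (Python) =====
-- def build_marked(data):
--     out = []
--     inside = False
--     for c in data.strip():
--         if not inside:
--             if c == '{':
--                 out.append('\n<span class="marked">')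
--                 inside = True
--             else:
--                 out.append(c)
--         else:
--             if c == '}':
--                 out.append('</span>\n')
--                 inside = False
--             else:
--                 out.append(c)
--     if inside:
--         out.append('</span>\n')
--     return ''.join(out)
-- ===== Notes on version B (the rewrite author's own statement) =====
-- stated objective: alternative
-- what changed: Replaces A's repeated str.partition loop (which rescans and reslices the remaining string each iteration) with a single left-to-right character scan driven by an inside/outside-span state flag, appending pieces to a list joined once.
import Mathlib
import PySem

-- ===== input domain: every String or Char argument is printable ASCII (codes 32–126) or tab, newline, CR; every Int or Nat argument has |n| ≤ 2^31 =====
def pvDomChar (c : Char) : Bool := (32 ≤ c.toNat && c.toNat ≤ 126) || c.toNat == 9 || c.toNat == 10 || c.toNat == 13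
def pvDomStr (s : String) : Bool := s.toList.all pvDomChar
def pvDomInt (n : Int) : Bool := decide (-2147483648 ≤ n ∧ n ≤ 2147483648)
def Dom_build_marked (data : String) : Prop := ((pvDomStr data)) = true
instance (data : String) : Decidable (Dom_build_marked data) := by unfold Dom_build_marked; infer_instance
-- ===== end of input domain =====

-- B replaces A's repeated str.partition loop by a single character scan with an
-- inside/outside-span flag; same return value, no speed claim.

-- ===== PORT A =====

-- the two literal HTML fragments both Pythons contain
def mkOpen : List Char := "\n<span class=\"marked\">".toList
def mkClose : List Char := "</span>\n".toList

-- exact port of Python str.partition on lists of chars (single-char separator,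
-- as A uses it): returns (part before first sep, part after); when sep is
-- absent returns (whole, []) — matching A's use of fields [0] and [2].
def pyPartition (sep : Char) : List Char → List Char × List Char
  | [] => ([], [])
  | c :: rest =>
      if c = sep then ([], rest)
      else
        let p := pyPartition sep rest
        (c :: p.1, p.2)

theorem pyPartition_snd_length_le (sep : Char) (t : List Char) :
    (pyPartition sep t).2.length ≤ t.length := by
  induction t with
  | nil => simp [pyPartition]
  | cons c rest ih =>
      simp only [pyPartition]
      split <;> simp <;> omega

theorem pyPartition_snd_length_lt (sep : Char) (t : List Char) (h : sep ∈ t) :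
    (pyPartition sep t).2.length < t.length := by
  induction t with
  | nil => simp at h
  | cons c rest ih =>
      simp only [pyPartition]
      split
      · simp
      · rename_i hc
        have : sep ∈ rest := by
          rcases List.mem_cons.mp h with h1 | h1
          · exact absurd h1.symm hc
          · exact h1
        have := ih this
        simp
        omega

-- the while loop of A: t is the remaining text, res the accumulated result
def goA (t res : List Char) : List Char :=
  if h : '{' ∈ t then
    let p := pyPartition '{' t
    let q := pyPartition '}' p.2
    goA q.2 (res ++ p.1 ++ mkOpen ++ q.1 ++ mkClose)
  else res ++ t
termination_by t.length
decreasing_by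
  exact lt_of_le_of_lt (pyPartition_snd_length_le _ _) (pyPartition_snd_length_lt _ _ h)

def build_marked (data : String) : String :=
  String.mk (goA (PySem.Str.strip data).toList [])

-- ===== PORT B =====

-- Source B's for-loop: one pass over the chars with the `inside` flag and the
-- accumulated output `out`
def goB : List Char → Bool → List Char → List Char
  | [], inside, out => if inside then out ++ mkClose else out
  | c :: rest, inside, out =>
      if inside = false then
        if c = '{' then goB rest true (out ++ mkOpen)
        else goB rest false (out ++ [c])
      else
        if c = '}' then goB rest false (out ++ mkClose)
        else goB rest true (out ++ [c])

def build_marked_alt (data : String) : String :=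
  String.mk (goB (PySem.Str.strip data).toList false [])

-- ===== PRECONDITION & SPEC =====
def Spec_build_marked (data : String) (out : String) : Prop := out = build_marked_alt data
instance (data : String) (out : String) : Decidable (Spec_build_marked data out) := by unfold Spec_build_marked; infer_instance

-- ===== CLAIM (what is proved, stated in full; the proofs are below) =====
def Claim_equal_build_marked : Prop := ∀ (data : String), Dom_build_marked data → Spec_build_marked data (build_marked data)

-- ===== LEMMAS AND PROOFS =====

theorem pyPartition_not_mem_fst (sep : Char) (t : List Char) :
    sep ∉ (pyPartition sep t).1 := by
  induction t with
  | nil => simp [pyPartition]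
  | cons c rest ih =>
      simp only [pyPartition]
      split
      · simp
      · rename_i hc
        simp [ih]
        exact fun h => hc h.symm

theorem pyPartition_eq_of_mem (sep : Char) (t : List Char) (h : sep ∈ t) :
    t = (pyPartition sep t).1 ++ sep :: (pyPartition sep t).2 := by
  induction t with
  | nil => simp at h
  | cons c rest ih =>
      simp only [pyPartition]
      split
      · rename_i hc; simp [hc]
      · rename_i hc
        have : sep ∈ rest := by
          rcases List.mem_cons.mp h with h1 | h1
          · exact absurd h1.symm hc
          · exact h1
        simpa using ih this
theorem pyPartition_eq_of_not_mem (sep : Char) (t : List Char) (h : sep ∉ t) :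
    pyPartition sep t = (t, []) := by
  induction t with
  | nil => simp [pyPartition]
  | cons c rest ih =>
      simp only [pyPartition]
      have hc : ¬ c = sep := fun e => h (by simp [e])
      simp [hc, ih (fun m => h (List.mem_cons_of_mem _ m))]

-- goB consumes a '{'-free prefix outside a span by copying it to the output
theorem goB_copy_outside (p0 : List Char) (h : '{' ∉ p0) :
    ∀ (cs out : List Char), goB (p0 ++ cs) false out = goB cs false (out ++ p0) := by
  induction p0 with
  | nil => intro cs out; simp
  | cons c rest ih =>
      intro cs out
      have hc : ¬ c = '{' := fun e => h (by simp [e])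
      simp only [List.cons_append, goB, if_pos rfl, if_neg hc]
      rw [ih (fun m => h (List.mem_cons_of_mem _ m))]
      simp

-- goB consumes a '}'-free prefix inside a span by copying it to the output
theorem goB_copy_inside (q0 : List Char) (h : '}' ∉ q0) :
    ∀ (cs out : List Char), goB (q0 ++ cs) true out = goB cs true (out ++ q0) := by
  induction q0 with
  | nil => intro cs out; simp
  | cons c rest ih =>
      intro cs out
      have hc : ¬ c = '}' := fun e => h (by simp [e])
      simp only [List.cons_append, goB, if_neg (by simp : ¬ (true = false)), if_neg hc]
      rw [ih (fun m => h (List.mem_cons_of_mem _ m))]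
      simp

-- main loop invariant: the state machine agrees with the partition loop
theorem goA_eq_goB (n : ℕ) : ∀ (t res : List Char), t.length ≤ n → goA t res = goB t false res := by
  induction n with
  | zero =>
      intro t res h
      have : t = [] := List.eq_nil_of_length_eq_zero (Nat.le_zero.mp h)
      subst this
      rw [goA]
      simp [goB]
  | succ n ih =>
      intro t res h
      by_cases hmem : '{' ∈ t
      · rw [goA]
        simp only [hmem, dif_pos]
        set p := pyPartition '{' t with hp
        have ht : t = p.1 ++ '{' :: p.2 := pyPartition_eq_of_mem _ _ hmem
        have hlt : p.2.length < t.length := by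
          have := pyPartition_snd_length_lt '{' t hmem
          simpa [← hp] using this
        -- run goB over the '{'-free prefix and the '{'
        conv_rhs => rw [ht]
        rw [goB_copy_outside p.1 (pyPartition_not_mem_fst '{' t) ('{' :: p.2) res]
        simp only [goB, if_pos rfl]
        by_cases hm2 : '}' ∈ p.2
        · set q := pyPartition '}' p.2 with hq
          have ht2 : p.2 = q.1 ++ '}' :: q.2 := pyPartition_eq_of_mem _ _ hm2
          have hlt2 : q.2.length < p.2.length := by
            have := pyPartition_snd_length_lt '}' p.2 hm2
            simpa [← hq] using this
          conv_rhs => rw [ht2]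
          rw [goB_copy_inside q.1 (pyPartition_not_mem_fst '}' p.2) ('}' :: q.2)]
          simp only [goB, if_neg (by simp : ¬ (true = false)), if_pos rfl]
          rw [ih q.2 _ (by omega)]
          simp
        · have hq0 : pyPartition '}' p.2 = (p.2, []) := pyPartition_eq_of_not_mem _ _ hm2
          rw [hq0]
          -- goB from inside state with no '}' left: copy and close
          have : goB p.2 true (res ++ p.1 ++ mkOpen) =
              (res ++ p.1 ++ mkOpen) ++ p.2 ++ mkClose := by
            have := goB_copy_inside p.2 hm2 [] (res ++ p.1 ++ mkOpen)
            simpa [goB] using this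
          rw [this, goA]
          simp
      · rw [goA]
        simp only [hmem, dif_neg, not_false_iff]
        have hp : pyPartition '{' t = (t, []) := pyPartition_eq_of_not_mem _ _ hmem
        have h2 := goB_copy_outside t hmem [] res
        simp [goB] at h2
        exact h2.symm

-- ===== VERDICT (by name: the statement is the Claim_ definition above) =====
theorem build_marked_spec : Claim_equal_build_marked := by
  intro data _
  unfold Spec_build_marked build_marked build_marked_alt
  rw [goA_eq_goB (PySem.Str.strip data).toList.length _ _ le_rfl]
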